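-- pv_equiv track=rewrite | github.com/juanpabl0svn/analisis | Taller5/juanPablo.py | DupAdd
-- ===== SOURCE A (Python) =====
-- def DupAdd(numero):
--   suma = 0
--
--   if numero %2 == 0:
--     suma+=1
--     for i in range(1,numero):
--       if suma == numero:
--         return i
--       suma*=2
--   else:
--     for i in range(numero):
--       if suma == numero:
--         return i
--       if suma * 2 <= numero:
--         suma*=2
--       if suma + 1 <= numero:
--         suma+=1
--   return numero
-- ===== SOURCE B (Python) =====
-- def DupAdd(numero):
--     if numero % 2 == 0:
--         k = numero.bit_length()
--         if numero >= 2 and (1 << (k - 1)) == numero: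
--             return k
--         return numero
--     if numero < 0:
--         return numero
--     k = (numero + 2).bit_length() - 1
--     return k + numero - (1 << k) + 1
-- ===== Notes on version B (the rewrite author's own statement) =====
-- stated objective: faster
-- what changed: Replaces A's per-iteration simulation (up to numero loop iterations, with an O(numero)-bit doubling accumulator on the even branch) by closed forms computed from bit_length: a power-of-two test for the even branch and the doubling-phase/increment-tail formula k + numero - 2**k + 1 for the odd branch.
import Mathlib
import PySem

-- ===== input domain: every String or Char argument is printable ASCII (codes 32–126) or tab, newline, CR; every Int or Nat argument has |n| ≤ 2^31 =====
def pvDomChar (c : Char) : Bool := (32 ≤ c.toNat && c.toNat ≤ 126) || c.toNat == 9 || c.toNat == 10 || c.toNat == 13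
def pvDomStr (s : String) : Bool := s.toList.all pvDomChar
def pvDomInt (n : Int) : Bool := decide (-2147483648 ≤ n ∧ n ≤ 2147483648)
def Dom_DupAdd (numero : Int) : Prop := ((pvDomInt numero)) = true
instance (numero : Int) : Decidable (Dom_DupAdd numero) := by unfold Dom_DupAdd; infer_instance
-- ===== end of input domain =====

-- B replaces A's O(numero)-iteration simulation by a closed form from bit_length
-- (power-of-two test for the even branch, doubling-phase/increment-tail arithmetic
-- for the odd branch); objective: faster.

-- ===== PORT A =====
-- the even-branch loop 'for i in range(1, numero): if suma == numero: return i; suma *= 2',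
-- as counted recursion: fuel = number of iterations left = (numero - i).toNat (Python's range is
-- lazy, so the loop is ported as recursion on the remaining iteration count, not a materialized list)
def DupAdd.evenLoop (numero : Int) : Nat → Int → Int → Int
  | 0, _, _ => numero
  | fuel + 1, i, suma =>
    if suma == numero then i
    else DupAdd.evenLoop numero fuel (i + 1) (suma * 2)

-- the odd-branch loop 'for i in range(numero): if suma == numero: return i;
-- if suma*2 <= numero: suma *= 2; if suma+1 <= numero: suma += 1', same counted recursion
def DupAdd.oddLoop (numero : Int) : Nat → Int → Int → Int
  | 0, _, _ => numero
  | fuel + 1, i, suma =>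
    if suma == numero then i
    else
      let suma := if suma * 2 ≤ numero then suma * 2 else suma
      let suma := if suma + 1 ≤ numero then suma + 1 else suma
      DupAdd.oddLoop numero fuel (i + 1) suma

def DupAdd (numero : Int) : Int :=
  let suma : Int := 0
  if PySem.Int.mod numero 2 == 0 then
    let suma := suma + 1
    DupAdd.evenLoop numero (numero - 1).toNat 1 suma
  else
    DupAdd.oddLoop numero numero.toNat 0 suma

-- ===== PORT B =====
def DupAdd_alt (numero : Int) : Int :=
  if PySem.Int.mod numero 2 == 0 then
    let k := PySem.Int.bitLength numero
    if 2 ≤ numero ∧ (1 : Int) <<< (k - 1) = numero then (k : Int) else numero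
  else if numero < 0 then numero
  else
    let k := PySem.Int.bitLength (numero + 2) - 1
    (k : Int) + numero - (1 : Int) <<< k + 1

-- ===== PRECONDITION & SPEC =====
def Spec_DupAdd (numero : Int) (out : Int) : Prop := out = DupAdd_alt numero
instance (numero : Int) (out : Int) : Decidable (Spec_DupAdd numero out) := by unfold Spec_DupAdd; infer_instance

-- ===== CLAIM (what is proved, stated in full; the proofs are below) =====
def Claim_equal_DupAdd : Prop := ∀ (numero : Int), Dom_DupAdd numero → Spec_DupAdd numero (DupAdd numero)

-- ===== LEMMAS AND PROOFS =====

theorem pv_shiftLeft_one (k : Nat) : (1:Int) <<< k = 2^k := by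
  simp [Int.shiftLeft_eq]

theorem pv_mod_two (n : Int) : PySem.Int.mod n 2 = n % 2 :=
  PySem.Int.mod_eq_emod_of_pos (by omega)

-- K + 2 ≤ 2^K (as integers) for K ≥ 2
theorem pv_add_two_le_pow (K : Nat) (hK : 2 ≤ K) : (K : Int) + 2 ≤ 2 ^ K := by
  induction K with
  | zero => omega
  | succ m ih =>
    rcases Nat.lt_or_ge m 2 with hm | hm
    · interval_cases m
      · omega
      · norm_num
    · have := ih hm
      have h1 : (1:Int) ≤ 2 ^ m := one_le_pow₀ (by norm_num)
      rw [pow_succ]; push_cast; omega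

-- the even loop never hits numero when no power of suma does
theorem pv_even_miss (n : Int) (fuel : Nat) : ∀ (a s : Int), fuel = (n - a).toNat →
    (∀ j : Nat, a + j < n → s * 2 ^ j ≠ n) →
    DupAdd.evenLoop n fuel a s = n := by
  induction fuel with
  | zero => intro a s _ _; rfl
  | succ f ih =>
    intro a s hf hmiss
    have ha : a < n := by omega
    simp only [DupAdd.evenLoop, beq_iff_eq]
    have hs : ¬ s = n := by
      have := hmiss 0 (by push_cast; omega)
      simpa using this
    rw [if_neg hs]
    apply ih
    · omega
    · intro j hj hc
      apply hmiss (j + 1) (by push_cast at hj ⊢; omega)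
      rw [pow_succ]
      linarith [hc]

-- the even loop returns a + j when s·2^j = n, s > 0, a + j < n
theorem pv_even_hit (n : Int) : ∀ (j : Nat) (fuel : Nat) (a s : Int), fuel = (n - a).toNat →
    0 < s → a + j < n → s * 2 ^ j = n →
    DupAdd.evenLoop n fuel a s = a + j := by
  intro j
  induction j with
  | zero =>
    intro fuel a s hf _ hlt heq
    simp only [pow_zero, mul_one] at heq
    have ha : a < n := by push_cast at hlt; omega
    obtain ⟨f, rfl⟩ : ∃ f, fuel = f + 1 := ⟨fuel - 1, by omega⟩
    simp [DupAdd.evenLoop, heq]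
  | succ m ih =>
    intro fuel a s hf hs hlt heq
    have ha : a < n := by push_cast at hlt; omega
    obtain ⟨f, rfl⟩ : ∃ f, fuel = f + 1 := ⟨fuel - 1, by omega⟩
    simp only [DupAdd.evenLoop, beq_iff_eq]
    have hsn : ¬ s = n := by
      have h1 : (1:Int) < 2 ^ (m + 1) := one_lt_pow₀ (by norm_num) (Nat.succ_ne_zero m)
      have h2 : s < s * 2 ^ (m + 1) := by
        have := mul_lt_mul_of_pos_left h1 hs
        simpa using this
      omega
    rw [if_neg hsn]
    have := ih f (a + 1) (s * 2) (by omega) (by omega) (by push_cast at hlt ⊢; omega)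
      (by rw [← heq, pow_succ]; ring)
    rw [this]
    push_cast; ring

-- doubling phase of the odd loop: from (a, 2^a − 1) it reaches (K, 2^K − 1)
theorem pv_odd_double (n : Int) (hn : 1 ≤ n) (hodd : n % 2 = 1) (K : Nat)
    (hK : (2:Int) ^ K ≤ n + 2) : ∀ (d a : Nat), a + d = K →
    DupAdd.oddLoop n (n - a).toNat (a : Int) (2 ^ a - 1) =
      DupAdd.oddLoop n (n - K).toNat (K : Int) (2 ^ K - 1) := by
  intro d
  induction d with
  | zero =>
    intro a hA
    have : a = K := by omega
    subst this; rfl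
  | succ m ih =>
    intro a hA
    have haK : a < K := by omega
    have hsucc : (2:Int) ^ (a + 1) ≤ n + 2 := by
      calc (2:Int) ^ (a + 1) ≤ 2 ^ K := by
            apply pow_le_pow_right₀ (by norm_num) (by omega)
        _ ≤ n + 2 := hK
    have han : (a : Int) < n := by
      rcases Nat.lt_or_ge K 2 with hK2 | hK2
      · have : a = 0 := by omega
        subst this; push_cast; omega
      · have h1 := pv_add_two_le_pow K hK2
        omega
    obtain ⟨f, hfe⟩ : ∃ f, (n - (a : Int)).toNat = f + 1 := ⟨(n - a).toNat - 1, by omega⟩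
    rw [hfe]
    simp only [DupAdd.oddLoop, beq_iff_eq]
    have hdvd : (2:Int) ∣ 2 ^ (a + 1) := dvd_pow_self 2 (Nat.succ_ne_zero a)
    obtain ⟨c, hc⟩ := hdvd
    have hne : ¬ (2:Int) ^ a - 1 = n := by
      intro hcontra
      rw [pow_succ] at hsucc
      omega
    rw [if_neg hne]
    have hdouble : ((2:Int) ^ a - 1) * 2 ≤ n := by
      rw [pow_succ] at hsucc; omega
    rw [if_pos hdouble]
    have hplus : ((2:Int) ^ a - 1) * 2 + 1 ≤ n := by
      -- 2^(a+1) ≠ n + 2 by parity (n is odd), so 2^(a+1) ≤ n + 1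
      rw [pow_succ] at hsucc hc
      omega
    rw [if_pos hplus]
    have hstep : ((2:Int) ^ a - 1) * 2 + 1 = 2 ^ (a + 1) - 1 := by
      rw [pow_succ]; ring
    rw [hstep]
    have := ih (a + 1) (by omega)
    have hfe2 : f = (n - ((a : Int) + 1)).toNat := by omega
    rw [hfe2]
    push_cast at this ⊢
    exact this

-- increment tail of the odd loop: once 2s > n it returns a + (n − s)
theorem pv_odd_tail (n : Int) : ∀ (d : Nat) (a s : Int), (n - s).toNat ≤ d →
    n < 2 * s → s ≤ n → a + (n - s) < n →
    DupAdd.oddLoop n (n - a).toNat a s = a + (n - s) := by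
  intro d
  induction d with
  | zero =>
    intro a s hd _ hsle hlt
    have hs : s = n := by omega
    obtain ⟨f, hfe⟩ : ∃ f, (n - a).toNat = f + 1 := ⟨(n - a).toNat - 1, by omega⟩
    rw [hfe]
    simp [DupAdd.oddLoop, hs]
  | succ m ih =>
    intro a s hd hgt hsle hlt
    obtain ⟨f, hfe⟩ : ∃ f, (n - a).toNat = f + 1 := ⟨(n - a).toNat - 1, by omega⟩
    rw [hfe]
    rcases eq_or_lt_of_le hsle with hs | hs
    · simp [DupAdd.oddLoop, hs]
    · simp only [DupAdd.oddLoop, beq_iff_eq]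
      rw [if_neg (show ¬ s = n by omega), if_neg (show ¬ s * 2 ≤ n by omega),
        if_pos (show s + 1 ≤ n by omega)]
      have := ih (a + 1) (s + 1) (by omega) (by omega) (by omega) (by omega)
      rw [show f = (n - (a + 1)).toNat by omega, this]
      omega

-- bitLength brackets, Int form, for n ≥ 1
theorem pv_bitLength_bounds (n : Int) (hn : 1 ≤ n) :
    (2:Int) ^ (PySem.Int.bitLength n - 1) ≤ n ∧ n < 2 ^ PySem.Int.bitLength n := by
  have h1 := PySem.Int.two_pow_bitLength_le n (by omega)
  have h2 := PySem.Int.lt_two_pow_bitLength n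
  have habs : (n.natAbs : Int) = n := Int.natAbs_of_nonneg (by omega)
  constructor
  · calc ((2:Int) ^ (PySem.Int.bitLength n - 1)) = ((2 ^ (PySem.Int.bitLength n - 1) : Nat) : Int) := by
          push_cast; rfl
      _ ≤ (n.natAbs : Int) := by exact_mod_cast h1
      _ = n := habs
  · calc n = (n.natAbs : Int) := habs.symm
      _ < ((2 ^ PySem.Int.bitLength n : Nat) : Int) := by exact_mod_cast h2
      _ = 2 ^ PySem.Int.bitLength n := by push_cast; rfl

-- ===== VERDICT (by name: the statement is the Claim_ definition above) =====
theorem DupAdd_spec : Claim_equal_DupAdd := by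
  intro n _
  unfold Spec_DupAdd DupAdd DupAdd_alt
  simp only [pv_mod_two, pv_shiftLeft_one, beq_iff_eq]
  by_cases hev : n % 2 = 0
  · rw [if_pos hev, if_pos hev]
    by_cases hle : n ≤ 0
    · -- no iterations on either side; the power-of-two test fails since n < 2
      rw [show (n - 1).toNat = 0 by omega]
      rw [if_neg (by omega : ¬ (2 ≤ n ∧ (2:Int) ^ (PySem.Int.bitLength n - 1) = n))]
      rfl
    · by_cases h2 : n = 2
      · subst h2; decide
      · have hn4 : 4 ≤ n := by omega
        obtain ⟨hlo, hhi⟩ := pv_bitLength_bounds n (by omega)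
        set k := PySem.Int.bitLength n with hk
        by_cases hC : 2 ≤ n ∧ (2:Int) ^ (k - 1) = n
        · -- n = 2^(k-1): the loop returns i = k = 1 + (k-1)
          rw [if_pos hC]
          have hk1 : 2 ≤ k - 1 := by
            by_contra hlt
            have : k - 1 ≤ 1 := by omega
            have : (2:Int) ^ (k - 1) ≤ 2 ^ 1 :=
              pow_le_pow_right₀ (by norm_num) this
            omega
          have hkn : 1 + ((k - 1 : Nat) : Int) < n := by
            have := pv_add_two_le_pow (k - 1) hk1
            omega
          have := pv_even_hit n (k - 1) (n - 1).toNat 1 1 rfl (by omega) hkn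
            (by rw [one_mul]; exact hC.2)
          rw [zero_add, this]
          have : 1 ≤ k := by omega
          push_cast [this]
          ring
        · -- n is not a power of two: the loop runs out and returns n
          rw [if_neg hC]
          rw [zero_add]
          apply pv_even_miss n (n - 1).toNat 1 1 rfl
          intro j hj hc
          rw [one_mul] at hc
          -- 2^j = n forces j = k - 1, contradicting ¬C
          apply hC
          refine ⟨by omega, ?_⟩
          have hjlt : j < k := by
            by_contra hge
            have : (2:Int) ^ k ≤ 2 ^ j := pow_le_pow_right₀ (by norm_num) (by omega)
            omega
          have hjge : k - 1 ≤ j := by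
            by_contra hlt
            have : (2:Int) ^ (j + 1) ≤ 2 ^ (k - 1) := pow_le_pow_right₀ (by norm_num) (by omega)
            rw [pow_succ] at this
            omega
          have : j = k - 1 := by omega
          rw [← this]; exact hc
  · rw [if_neg hev, if_neg hev]
    have hodd : n % 2 = 1 := by omega
    by_cases hneg : n < 0
    · rw [if_pos hneg, show n.toNat = 0 by omega]
      rfl
    · rw [if_neg hneg]
      by_cases h1 : n = 1
      · subst h1; decide
      · have hn3 : 3 ≤ n := by omega
        obtain ⟨hlo, hhi⟩ := pv_bitLength_bounds (n + 2) (by omega)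
        set L := PySem.Int.bitLength (n + 2) with hL
        have hL1 : 1 ≤ L := by
          by_contra hc
          have : L = 0 := by omega
          rw [this] at hhi; norm_num at hhi; omega
        have hKhi : n + 2 < 2 ^ ((L - 1) + 1) := by
          have : (L - 1) + 1 = L := by omega
          rw [this]; exact hhi
        have hK2 : 2 ≤ L - 1 := by
          by_contra hc
          have : (L - 1) + 1 ≤ 2 := by omega
          have := pow_le_pow_right₀ (show (1:Int) ≤ 2 by norm_num) this
          omega
        have hdvd : (2:Int) ∣ 2 ^ (L - 1) := dvd_pow_self 2 (by omega)
        obtain ⟨c, hc⟩ := hdvd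
        have hKle : (2:Int) ^ (L - 1) ≤ n + 1 := by omega
        have hdbl := pv_odd_double n (by omega) hodd (L - 1) (by omega) (L - 1) 0 (by omega)
        norm_num at hdbl
        rw [show n.toNat = (n - (0:Int)).toNat by omega] at hdbl ⊢
        rw [hdbl]
        rw [show (n - (0:Int)).toNat - (L - 1) = (n - ((L - 1 : Nat) : Int)).toNat by omega]
        have hKdvd : (2:Int) ∣ 2 ^ ((L - 1) + 1) := dvd_pow_self 2 (by omega)
        have hKK := pv_add_two_le_pow (L - 1) hK2
        have htail := pv_odd_tail n (n - (2 ^ (L - 1) - 1)).toNat ((L - 1 : Nat) : Int)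
          (2 ^ (L - 1) - 1) (by omega)
          (by rw [pow_succ] at hKhi; omega) (by omega) (by omega)
        rw [htail]
        omega
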